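-- pv_equiv track=rewrite | github.com/raratiru/thepysec | thepysec/lia.py | cap_sentence
-- ===== SOURCE A (Python) =====
-- def cap_sentence(s):
--     """
--     * Remove extra space
--     * Lower all letters if word.isupper() and len(word) > 3
--     * Capitalize the first letter of each word
--     """
--     sentence = " ".join(
--         [c.lower() if c.isupper() and len(c) > 3 else c for c in s.split()]
--     )
--     return "".join(
--         c.upper() if i == 0 or sentence[i - 1] == " " else c
--         for i, c in enumerate(sentence)
--     )
-- ===== SOURCE B (Python) =====
-- def cap_sentence(s):
--     def cap_word(w):
--         if w.isupper() and len(w) > 3: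
--             w = w.lower()
--         return w[0].upper() + w[1:]
--     return " ".join(cap_word(w) for w in s.split())
-- ===== Notes on version B (the rewrite author's own statement) =====
-- stated objective: simpler
-- what changed: Replaces A's second character-by-character enumerate pass that detects word starts by looking back at sentence[i-1] with a single pass over s.split() that uppercases each word's first character directly and joins once.
import Mathlib
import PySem

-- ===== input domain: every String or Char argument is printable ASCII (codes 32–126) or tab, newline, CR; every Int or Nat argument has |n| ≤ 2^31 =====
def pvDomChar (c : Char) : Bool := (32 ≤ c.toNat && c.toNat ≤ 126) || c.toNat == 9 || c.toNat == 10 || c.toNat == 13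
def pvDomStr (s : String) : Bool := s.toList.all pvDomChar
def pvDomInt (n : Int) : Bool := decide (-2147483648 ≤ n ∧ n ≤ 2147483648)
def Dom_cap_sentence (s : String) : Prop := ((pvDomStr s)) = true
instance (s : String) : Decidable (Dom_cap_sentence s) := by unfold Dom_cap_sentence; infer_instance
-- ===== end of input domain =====

-- B replaces A's second char-by-char scan (word starts found via sentence[i-1] == ' ')
-- by directly uppercasing each word's first character in one pass over s.split(); simpler, same cost.

-- word.isupper() (shared by both Pythons): exact on the ASCII domain — at least one
-- cased character and no lowercase one (in ASCII, cased = letter).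
def strIsupperW (cs : List Char) : Bool :=
  cs.any PySem.Chars.isupper && !(cs.any PySem.Chars.islower)

-- `c.lower() if c.isupper() and len(c) > 3 else c` — the identical expression in both Pythons
def capsLower (w : List Char) : List Char :=
  if strIsupperW w && decide (3 < PySem.Chars.len w) then PySem.Chars.lower w else w

-- ===== PORT A =====
def cap_sentence (s : String) : String :=
  let sentence : List Char :=
    PySem.Chars.join [' '] ((PySem.Chars.split₀ s.toList).map capsLower)
  String.ofList ((PySem.List.enumerate sentence).map (fun ic =>
    if ic.1 == 0 || (PySem.List.pyGet? sentence (ic.1 - 1) == some ' ')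
    then PySem.Chars.upperChar ic.2 else ic.2))

-- ===== PORT B =====
-- `w[0].upper() + w[1:]`; [] is unreachable (split() words are nonempty, so w[0] never raises)
def capFirst (w : List Char) : List Char :=
  match w with
  | [] => []
  | a :: tl => PySem.Chars.upperChar a :: tl

def capWordB (w : List Char) : List Char := capFirst (capsLower w)

def cap_sentence_alt (s : String) : String :=
  String.ofList (PySem.Chars.join [' '] ((PySem.Chars.split₀ s.toList).map capWordB))

-- ===== PRECONDITION & SPEC =====
def Spec_cap_sentence (s : String) (out : String) : Prop := out = cap_sentence_alt s
instance (s : String) (out : String) : Decidable (Spec_cap_sentence s out) := by unfold Spec_cap_sentence; infer_instance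

-- ===== CLAIM (what is proved, stated in full; the proofs are below) =====
def Claim_equal_cap_sentence : Prop := ∀ (s : String), Dom_cap_sentence s → Spec_cap_sentence s (cap_sentence s)

-- ===== LEMMAS AND PROOFS =====

-- A's second pass, rephrased as a scan that remembers the previous character
def scanPrev (p : Option Char) : List Char → List Char
  | [] => []
  | c :: cs =>
      (if p = none ∨ p = some ' ' then PySem.Chars.upperChar c else c) :: scanPrev (some c) cs

theorem length_scanPrev (p : Option Char) (t : List Char) : (scanPrev p t).length = t.length := by
  induction t generalizing p with
  | nil => rfl
  | cons c cs ih => simp [scanPrev, ih]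

-- does A's pass uppercase position i?
def startHere (t : List Char) (p : Option Char) (i : Nat) : Bool :=
  if i = 0 then (p == none || p == some ' ') else (t[i-1]? == some ' ')

theorem getElem_scanPrev (t : List Char) (p : Option Char) (i : Nat) (h : i < t.length) :
    (scanPrev p t)[i]'(by rw [length_scanPrev]; exact h) =
      (if startHere t p i then PySem.Chars.upperChar (t[i]'h) else t[i]'h) := by
  induction t generalizing p i with
  | nil => simp at h
  | cons c cs ih =>
    cases i with
    | zero =>
      simp only [scanPrev, List.getElem_cons_zero, startHere]
      cases p with
      | none => simp
      | some a => by_cases ha : a = ' ' <;> simp [ha]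
    | succ k =>
      simp only [scanPrev, List.getElem_cons_succ]
      rw [ih (some c) k (by simpa using h)]
      congr 1
      · unfold startHere
        cases k with
        | zero => simp
        | succ m => simp

theorem passA_eq_scanPrev (t : List Char) :
    (PySem.List.enumerate t).map (fun ic =>
      if ic.1 == 0 || (PySem.List.pyGet? t (ic.1 - 1) == some ' ')
      then PySem.Chars.upperChar ic.2 else ic.2) = scanPrev none t := by
  apply List.ext_getElem
  · simp [PySem.List.length_enumerate, length_scanPrev]
  · intro i h1 h2
    have hi : i < t.length := by simpa [PySem.List.length_enumerate] using h1
    rw [List.getElem_map, PySem.List.getElem_enumerate t 0 i (by simpa [PySem.List.length_enumerate] using hi)]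
    rw [getElem_scanPrev t none i hi]
    simp only [zero_add]
    cases i with
    | zero => simp [startHere]
    | succ k =>
      have h0 : ((↑(k+1) : Int) == 0) = false := beq_eq_false_iff_ne.mpr (by push_cast; omega)
      have h1' : (↑(k+1) : Int) - 1 = (↑k : Nat) := by push_cast; ring
      rw [h0, Bool.false_or, h1', PySem.List.pyGet?_natCast]
      simp [startHere]

theorem lastc_not_space (ys : List Char) (c : Char) (hc : PySem.Chars.isspace c = false)
    (hys : ∀ a ∈ ys, PySem.Chars.isspace a = false) :
    PySem.Chars.isspace (ys.foldl (fun _ a => a) c) = false := by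
  induction ys generalizing c with
  | nil => exact hc
  | cons y ys ih =>
    exact ih y (hys y (List.mem_cons_self)) (fun a ha => hys a (List.mem_cons_of_mem _ ha))

theorem scan_nonword (ys : List Char) (c : Char) (r : List Char)
    (hc : PySem.Chars.isspace c = false)
    (hys : ∀ a ∈ ys, PySem.Chars.isspace a = false) :
    scanPrev (some c) (ys ++ r) = ys ++ scanPrev (some (ys.foldl (fun _ a => a) c)) r := by
  induction ys generalizing c with
  | nil => rfl
  | cons y ys ih =>
    have hcne : c ≠ ' ' := fun h => by subst h; exact absurd hc (by decide)
    have hcond : ¬ ((some c : Option Char) = none ∨ (some c : Option Char) = some ' ') := by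
      simp [hcne]
    simp only [List.cons_append, scanPrev, if_neg hcond, List.foldl_cons]
    rw [ih y (hys y List.mem_cons_self) (fun a ha => hys a (List.mem_cons_of_mem _ ha))]

theorem scanJoin (ws : List (List Char)) (p : Option Char)
    (hgood : ∀ w ∈ ws, w ≠ [] ∧ ∀ a ∈ w, PySem.Chars.isspace a = false)
    (hp : p = none ∨ p = some ' ') :
    scanPrev p (PySem.Chars.join [' '] ws) = PySem.Chars.join [' '] (ws.map capFirst) := by
  induction ws generalizing p with
  | nil => simp [PySem.Chars.join_nil, scanPrev]
  | cons w ws ih =>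
    obtain ⟨hne, hwa⟩ := hgood w List.mem_cons_self
    obtain ⟨a, tl, rfl⟩ := List.exists_cons_of_ne_nil hne
    have ha : PySem.Chars.isspace a = false := hwa a List.mem_cons_self
    have htl : ∀ x ∈ tl, PySem.Chars.isspace x = false :=
      fun x hx => hwa x (List.mem_cons_of_mem _ hx)
    cases ws with
    | nil =>
      simp only [PySem.Chars.join_singleton, List.map_cons, List.map_nil]
      simp only [scanPrev, if_pos hp, capFirst]
      have := scan_nonword tl a [] ha htl
      rw [List.append_nil] at this
      rw [this, scanPrev, List.append_nil]
    | cons w2 ws2 =>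
      have hjoin : PySem.Chars.join [' '] ((a :: tl) :: w2 :: ws2)
          = (a :: tl) ++ ' ' :: PySem.Chars.join [' '] (w2 :: ws2) := by
        rw [PySem.Chars.join_cons_cons]; simp
      have hjoin2 : PySem.Chars.join [' '] (((a :: tl) :: w2 :: ws2).map capFirst)
          = capFirst (a :: tl) ++ ' ' :: PySem.Chars.join [' '] ((w2 :: ws2).map capFirst) := by
        rw [List.map_cons, List.map_cons, PySem.Chars.join_cons_cons]; simp
      rw [hjoin, hjoin2]
      simp only [List.cons_append, scanPrev, if_pos hp]
      rw [scan_nonword tl a (' ' :: PySem.Chars.join [' '] (w2 :: ws2)) ha htl]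
      have hlast : PySem.Chars.isspace (tl.foldl (fun _ x => x) a) = false :=
        lastc_not_space tl a ha htl
      have hlne : (tl.foldl (fun _ x => x) a) ≠ ' ' := fun h => by
        rw [h] at hlast; exact absurd hlast (by decide)
      have hcond : ¬ ((some (tl.foldl (fun _ x => x) a) : Option Char) = none ∨
          (some (tl.foldl (fun _ x => x) a) : Option Char) = some ' ') := by
        simp [hlne]
      simp only [scanPrev, if_neg hcond]
      rw [ih (some ' ') (fun w hw => hgood w (List.mem_cons_of_mem _ hw)) (Or.inr rfl)]
      simp [capFirst]

-- every word produced by s.split() is nonempty and whitespace-free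
theorem split₀_go_good (cs cur : List Char) (acc : List (List Char))
    (hcur : ∀ a ∈ cur, PySem.Chars.isspace a = false)
    (hacc : ∀ w ∈ acc, w ≠ [] ∧ ∀ a ∈ w, PySem.Chars.isspace a = false) :
    ∀ w ∈ PySem.Chars.split₀.go cs cur acc, w ≠ [] ∧ ∀ a ∈ w, PySem.Chars.isspace a = false := by
  induction cs generalizing cur acc with
  | nil =>
    intro w hw
    by_cases h : cur.isEmpty
    · rw [PySem.Chars.split₀.go, if_pos h] at hw
      exact hacc w (List.mem_reverse.mp hw)
    · rw [PySem.Chars.split₀.go, if_neg h] at hw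
      rw [List.mem_reverse, List.mem_cons] at hw
      rcases hw with hw | hw
      · subst hw
        refine ⟨fun hh => h ?_, fun a ha => hcur a (List.mem_reverse.mp ha)⟩
        rw [List.isEmpty_iff]
        simpa using congrArg List.reverse hh
      · exact hacc w hw
  | cons c rest ih =>
    intro w hw
    rw [PySem.Chars.split₀.go] at hw
    by_cases hs : PySem.Chars.isspace c
    · rw [if_pos hs] at hw
      by_cases h : cur.isEmpty
      · rw [if_pos h] at hw
        exact ih [] acc (by simp) hacc w hw
      · rw [if_neg h] at hw
        refine ih [] (cur.reverse :: acc) (by simp) ?_ w hw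
        intro v hv
        rw [List.mem_cons] at hv
        rcases hv with hv | hv
        · subst hv
          refine ⟨fun hh => h ?_, fun a ha => hcur a (List.mem_reverse.mp ha)⟩
          rw [List.isEmpty_iff]
          simpa using congrArg List.reverse hh
        · exact hacc v hv
    · rw [if_neg hs] at hw
      refine ih (c :: cur) acc ?_ hacc w hw
      intro a ha
      rw [List.mem_cons] at ha
      rcases ha with ha | ha
      · subst ha; exact Bool.not_eq_true _ ▸ (by simpa using hs)
      · exact hcur a ha

theorem split₀_good (cs : List Char) :
    ∀ w ∈ PySem.Chars.split₀ cs, w ≠ [] ∧ ∀ a ∈ w, PySem.Chars.isspace a = false :=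
  split₀_go_good cs [] [] (by simp) (by simp)

theorem isspace_lowerChar (a : Char) :
    PySem.Chars.isspace (PySem.Chars.lowerChar a) = PySem.Chars.isspace a := by
  unfold PySem.Chars.lowerChar
  by_cases h : PySem.Chars.isupper a = true
  · rw [if_pos h]
    have hb : 'A' ≤ a ∧ a ≤ 'Z' := by
      unfold PySem.Chars.isupper at h
      simpa [Bool.and_eq_true, decide_eq_true_eq] using h
    have h1 : 65 ≤ a.toNat := Nat.succ_le_of_lt hb.1
    have h2 : a.toNat ≤ 90 := hb.2
    have hv : (a.toNat + 32).isValidChar := Or.inl (by omega)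
    have ht : (Char.ofNat (a.toNat + 32)).toNat = a.toNat + 32 := by
      rw [Char.toNat_ofNat, if_pos hv]
    have hl : PySem.Chars.isspace (Char.ofNat (a.toNat + 32)) = false := by
      simp only [PySem.Chars.isspace, ht, Bool.or_eq_false_iff, Bool.and_eq_false_iff,
        decide_eq_false_iff_not]
      omega
    have hr : PySem.Chars.isspace a = false := by
      simp only [PySem.Chars.isspace, Bool.or_eq_false_iff, Bool.and_eq_false_iff,
        decide_eq_false_iff_not]
      omega
    rw [hl, hr]
  · rw [if_neg h]

theorem capsLower_good (w : List Char) (hne : w ≠ [])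
    (hw : ∀ a ∈ w, PySem.Chars.isspace a = false) :
    capsLower w ≠ [] ∧ ∀ a ∈ capsLower w, PySem.Chars.isspace a = false := by
  unfold capsLower
  split_ifs with h
  · constructor
    · simpa [PySem.Chars.lower] using hne
    · intro a ha
      simp only [PySem.Chars.lower, List.mem_map] at ha
      obtain ⟨b, hb, rfl⟩ := ha
      rw [isspace_lowerChar]
      exact hw b hb
  · exact ⟨hne, hw⟩

-- ===== VERDICT (by name: the statement is the Claim_ definition above) =====
theorem cap_sentence_spec : Claim_equal_cap_sentence := by
  intro s _
  unfold Spec_cap_sentence cap_sentence cap_sentence_alt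
  have hgood : ∀ w ∈ (PySem.Chars.split₀ s.toList).map capsLower,
      w ≠ [] ∧ ∀ a ∈ w, PySem.Chars.isspace a = false := by
    intro w hw
    rw [List.mem_map] at hw
    obtain ⟨v, hv, rfl⟩ := hw
    obtain ⟨h1, h2⟩ := split₀_good s.toList v hv
    exact capsLower_good v h1 h2
  show String.ofList ((PySem.List.enumerate
        (PySem.Chars.join [' '] ((PySem.Chars.split₀ s.toList).map capsLower))).map (fun ic =>
      if ic.1 == 0 || (PySem.List.pyGet?
          (PySem.Chars.join [' '] ((PySem.Chars.split₀ s.toList).map capsLower)) (ic.1 - 1) == some ' ')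
      then PySem.Chars.upperChar ic.2 else ic.2))
    = String.ofList (PySem.Chars.join [' '] ((PySem.Chars.split₀ s.toList).map capWordB))
  rw [passA_eq_scanPrev, scanJoin _ none hgood (Or.inl rfl), List.map_map]
  rfl
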